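-- pv_equiv track=rewrite | github.com/ritz-lang/rz | projects/ritz/tools/apply_string_migration.py | strip_s_prefix_from_line
-- ===== SOURCE A (Python) =====
-- from typing import Iterator, Optional
--
-- def scan_literals(line: str) -> Iterator[tuple[int, Optional[str], int, int]]:
--     """Yield ``(start, prefix, body_start, end)`` for each string literal
--     in *line*.
--
--     * ``start``       -- 0-based column of the prefix char (``c`` / ``s``)
--                          when the literal is prefixed, else of the opening
--                          ``"``.
--     * ``prefix``      -- ``'c'``, ``'s'``, or ``None``.
--     * ``body_start``  -- 0-based column of the first char after the
--                          opening ``"``.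
--     * ``end``         -- 0-based column immediately after the closing
--                          ``"``.
--
--     Scanning stops at a ``#`` comment and skips char literals (``'x'``).
--     """
--     i = 0
--     n = len(line)
--     while i < n:
--         ch = line[i]
--
--         # Comments end the scan.
--         if ch == "#":
--             return
--
--         # Char literals (`'x'`, with backslash escapes) -- skip entirely so
--         # that a `"` inside a char lit isn't picked up as a string.
--         if ch == "'":
--             j = i + 1
--             while j < n:
--                 if line[j] == "\\" and j + 1 < n:
--                     j += 2
--                     continue
--                 if line[j] == "'":
--                     j += 1
--                     break
--                 j += 1
--             i = j
--             continue
--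
--         if ch == '"':
--             prefix: Optional[str] = None
--             start = i
--             if i >= 1 and line[i - 1] in ("c", "s"):
--                 prev2 = line[i - 2] if i >= 2 else ""
--                 # A prefix is only a prefix if the char before it isn't an
--                 # identifier continuation -- otherwise we'd eat the trailing
--                 # letter of some unrelated identifier.
--                 if not (prev2.isalnum() or prev2 == "_"):
--                     prefix = line[i - 1]
--                     start = i - 1
--             body_start = i + 1
--             j = i + 1
--             while j < n:
--                 if line[j] == "\\" and j + 1 < n:
--                     j += 2
--                     continue
--                 if line[j] == '"':
--                     j += 1
--                     break
--                 j += 1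
--             yield start, prefix, body_start, j
--             i = j
--             continue
--
--         i += 1
--
-- def strip_s_prefix_from_line(line: str) -> tuple[str, int]:
--     """Remove the ``s`` prefix from every ``s"..."`` literal on *line*.
--
--     Returns ``(new_line, n_stripped)``.  Comments and char literals are
--     skipped via the shared scanner, so ``s`` characters that are part of
--     an identifier (e.g. ``callfoos("x")``) are preserved.
--     """
--     drops: list[int] = []
--     for start, prefix, _body, _end in scan_literals(line):
--         if prefix == "s":
--             drops.append(start)
--     if not drops:
--         return line, 0
--     out = line
--     for idx in sorted(drops, reverse=True):
--         out = out[:idx] + out[idx + 1:]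
--     return out, len(drops)
-- ===== SOURCE B (Python) =====
-- def _scan_end(line: str, j: int, quote: str) -> int:
--     """Advance j past the body of a literal opened before j, honoring
--     backslash escapes; returns the index just after the closing *quote*
--     (or len(line) if unterminated)."""
--     n = len(line)
--     while j < n:
--         if line[j] == "\\" and j + 1 < n:
--             j += 2
--         elif line[j] == quote:
--             return j + 1
--         else:
--             j += 1
--     return j
--
--
-- def strip_s_prefix_from_line(line: str) -> tuple[str, int]:
--     """Single fused pass: build the output buffer char by char, dropping
--     each ``s`` that prefixes a ``"..."`` literal, counting as we go."""
--     buf: list[str] = []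
--     count = 0
--     i = 0
--     n = len(line)
--     while i < n:
--         ch = line[i]
--         if ch == "#":
--             buf.append(line[i:])
--             break
--         if ch == "'":
--             j = _scan_end(line, i + 1, "'")
--             buf.append(line[i:j])
--             i = j
--         elif (ch == "s" and i + 1 < n and line[i + 1] == '"'
--               and not (i >= 1 and (line[i - 1].isalnum() or line[i - 1] == "_"))):
--             count += 1
--             i += 1
--         elif ch == '"':
--             j = _scan_end(line, i + 1, '"')
--             buf.append(line[i:j])
--             i = j
--         else:
--             buf.append(ch)
--             i += 1
--     return "".join(buf), count
-- ===== Notes on version B (the rewrite author's own statement) =====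
-- stated objective: simpler
-- what changed: B replaces A's two-phase pipeline (generator yielding literal tuples, collecting drop indices, then repeatedly re-slicing the string per index in reverse-sorted order) with one fused left-to-right state-machine pass that copies characters into an output buffer, omitting and counting each stripped prefix character as it goes.
import Mathlib
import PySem

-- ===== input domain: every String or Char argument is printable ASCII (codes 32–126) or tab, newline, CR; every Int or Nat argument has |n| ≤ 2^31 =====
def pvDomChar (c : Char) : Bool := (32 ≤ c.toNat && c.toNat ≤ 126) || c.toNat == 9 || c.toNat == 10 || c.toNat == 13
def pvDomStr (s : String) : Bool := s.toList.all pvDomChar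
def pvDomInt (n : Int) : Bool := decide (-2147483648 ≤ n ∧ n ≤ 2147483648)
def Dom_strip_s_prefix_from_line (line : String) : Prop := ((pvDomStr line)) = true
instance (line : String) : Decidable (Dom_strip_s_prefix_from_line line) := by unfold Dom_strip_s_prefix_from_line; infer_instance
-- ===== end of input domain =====

-- B rewrites A's yield-literals-then-delete-indices pipeline as one fused left-to-right pass that
-- copies characters into an output buffer and simply omits each stripped `s` (objective: simpler).

-- `prev.isalnum() or prev == "_"` — exact for the ASCII domain (Char.isAlphanum is the ASCII alnum test).
def identCont (c : Char) : Bool := c.isAlphanum || c = '_'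

-- The shared escape-aware `while j < n: …` loop that both Pythons use to find the index just past
-- the closing *quote* of a literal body starting at j (A inlines it twice; B's helper `_scan_end`).
def findEnd (l : List Char) (quote : Char) (j : Nat) : Nat :=
  if h : j < l.length then
    if l[j] = '\\' ∧ j + 1 < l.length then findEnd l quote (j + 2)
    else if l[j] = quote then j + 1
    else findEnd l quote (j + 1)
  else j
termination_by l.length - j

-- lemma the ports need for termination (scanA/loopB jump to a findEnd result)
theorem le_findEnd (l : List Char) (q : Char) (j : Nat) : j ≤ findEnd l q j := by
  unfold findEnd
  split
  · split
    · exact le_trans (by omega) (le_findEnd l q (j + 2))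
    · split
      · omega
      · exact le_trans (by omega) (le_findEnd l q (j + 1))
  · exact le_refl j
termination_by l.length - j

-- ===== PORT A =====
-- scan_literals, materialized as the list of all yielded (start, prefix, body_start, end) tuples,
-- scanning from position i.  Out-of-loop lookbacks line[i-1]/line[i-2] are guarded reads (getD).
def scanA (l : List Char) (i : Nat) : List (Nat × Option Char × Nat × Nat) :=
  if h : i < l.length then
    if l[i] = '#' then []
    else if l[i] = '\'' then scanA l (findEnd l '\'' (i + 1))
    else if l[i] = '"' then
      -- start/prefix per A: prefixed iff i>=1, line[i-1] in ("c","s"), and prev2 (or "" when i<2)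
      -- is not an identifier continuation ("".isalnum() is False, encoded by the `2 ≤ i` conjunct).
      let sp : Nat × Option Char :=
        if 1 ≤ i ∧ (l.getD (i - 1) ' ' = 'c' ∨ l.getD (i - 1) ' ' = 's') then
          if ¬ (2 ≤ i ∧ identCont (l.getD (i - 2) ' ') = true) then
            (i - 1, some (l.getD (i - 1) ' '))
          else (i, none)
        else (i, none)
      let j := findEnd l '"' (i + 1)
      (sp.1, sp.2, i + 1, j) :: scanA l j
    else scanA l (i + 1)
  else []
termination_by l.length - i
decreasing_by
  · have := le_findEnd l '\'' (i + 1); omega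
  · have := le_findEnd l '"' (i + 1); omega
  · omega

def strip_s_prefix_from_line (line : String) : String × Int :=
  let l := line.toList
  -- the drops-collecting loop over scan_literals
  let drops : List Nat := (scanA l 0).filterMap (fun t => if t.2.1 = some 's' then some t.1 else none)
  if drops = [] then (line, 0)
  else
    -- out = out[:idx] + out[idx+1:] — exact as take/drop since idx is a nonnegative position
    let out := (PySem.List.sorted drops (fun x => x) true).foldl
      (fun out idx => out.take idx ++ out.drop (idx + 1)) l
    (String.ofList out, (drops.length : Int))

-- ===== PORT B =====
-- Source B's single fused pass: buf/count accumulators, one branch per character class;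
-- slices line[i:], line[i:j] are (l.drop i), (l.drop i).take (j-i) for these nonneg in-order indices.
def loopB (l : List Char) (i : Nat) (buf : List Char) (count : Int) : List Char × Int :=
  if h : i < l.length then
    if l[i] = '#' then (buf ++ l.drop i, count)
    else if l[i] = '\'' then
      let j := findEnd l '\'' (i + 1)
      loopB l j (buf ++ (l.drop i).take (j - i)) count
    else if l[i] = 's' ∧ i + 1 < l.length ∧ l.getD (i + 1) ' ' = '"' ∧
            ¬ (1 ≤ i ∧ identCont (l.getD (i - 1) ' ') = true) then
      loopB l (i + 1) buf (count + 1)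
    else if l[i] = '"' then
      let j := findEnd l '"' (i + 1)
      loopB l j (buf ++ (l.drop i).take (j - i)) count
    else loopB l (i + 1) (buf ++ [l[i]]) count
  else (buf, count)
termination_by l.length - i
decreasing_by
  · have := le_findEnd l '\'' (i + 1); omega
  · omega
  · have := le_findEnd l '"' (i + 1); omega
  · omega

def strip_s_prefix_from_line_alt (line : String) : String × Int :=
  let r := loopB line.toList 0 [] 0
  (String.ofList r.1, r.2)

-- ===== PRECONDITION & SPEC =====
def Spec_strip_s_prefix_from_line (line : String) (out : String × Int) : Prop := out = strip_s_prefix_from_line_alt line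
instance (line : String) (out : String × Int) : Decidable (Spec_strip_s_prefix_from_line line out) := by unfold Spec_strip_s_prefix_from_line; infer_instance

-- ===== CLAIM (what is proved, stated in full; the proofs are below) =====
def Claim_equal_strip_s_prefix_from_line : Prop := ∀ (line : String), Dom_strip_s_prefix_from_line line → Spec_strip_s_prefix_from_line line (strip_s_prefix_from_line line)

-- ===== LEMMAS AND PROOFS =====

-- the s-prefix-drop condition A's scanner applies at a quote position i
def sdropAt (l : List Char) (i : Nat) : Prop :=
  1 ≤ i ∧ l.getD (i - 1) ' ' = 's' ∧ ¬ (2 ≤ i ∧ identCont (l.getD (i - 2) ' ') = true)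

-- positions the scan loops visit in code context never carry a pending s-prefix themselves
def GoodAt (l : List Char) (i : Nat) : Prop :=
  ∀ (h : i < l.length), l[i] = '"' → ¬ sdropAt l i

def dropsA (l : List Char) (i : Nat) : List Nat :=
  (scanA l i).filterMap (fun t => if t.2.1 = some 's' then some t.1 else none)

theorem findEnd_le (l : List Char) (q : Char) (j : Nat) (hj : j ≤ l.length) :
    findEnd l q j ≤ l.length := by
  unfold findEnd
  split
  · split
    · next hb => exact findEnd_le l q (j + 2) (by omega)
    · split
      · next h _ _ => omega
      · next h _ _ => exact findEnd_le l q (j + 1) (by omega)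
  · exact hj
termination_by l.length - j

theorem findEnd_prev (l : List Char) (q : Char) (j : Nat) (hj : 1 ≤ j)
    (hj2 : j ≤ l.length) :
    findEnd l q j = l.length ∨
      (1 ≤ findEnd l q j ∧ l.getD (findEnd l q j - 1) ' ' = q) := by
  rw [findEnd]
  split
  · next h =>
    split
    · next hb => exact findEnd_prev l q (j + 2) (by omega) (by omega)
    · split
      · next hq =>
        right
        refine ⟨by omega, ?_⟩
        simpa [List.getD, List.getElem?_eq_getElem h] using hq
      · next hq => exact findEnd_prev l q (j + 1) (by omega) (by omega)
  · next h => left; omega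
termination_by l.length - j

theorem goodAt_findEnd (l : List Char) (q : Char) (j : Nat) (hj : 1 ≤ j)
    (hj2 : j ≤ l.length) (hq : q = '\'' ∨ q = '"') : GoodAt l (findEnd l q j) := by
  intro h _ hs
  rcases findEnd_prev l q j hj hj2 with he | ⟨_, hprev⟩
  · omega
  · rw [hs.2.1] at hprev
    rcases hq with h' | h' <;> simp [h'] at hprev

-- accumulator lemma for B's loop (by fuel on the remaining suffix)
theorem loopB_acc_fuel (l : List Char) : ∀ (k i : Nat), l.length - i ≤ k →
    ∀ (buf : List Char) (count : Int),
    loopB l i buf count = (buf ++ (loopB l i [] 0).1, count + (loopB l i [] 0).2) := by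
  intro k
  induction k with
  | zero =>
    intro i hk buf count
    rw [loopB.eq_def]
    conv_rhs => rw [loopB.eq_def]
    rw [dif_neg (by omega), dif_neg (by omega)]
    simp
  | succ k ih =>
    intro i hk buf count
    by_cases h : i < l.length
    · rw [loopB.eq_def]
      conv_rhs => rw [loopB.eq_def]
      rw [dif_pos h, dif_pos h]
      by_cases h1 : l[i] = '#'
      · simp [h1]
      · rw [if_neg h1, if_neg h1]
        by_cases h2 : l[i] = '\''
        · rw [if_pos h2, if_pos h2]
          have hj := le_findEnd l '\'' (i + 1)
          have e1 := ih (findEnd l '\'' (i + 1)) (by omega)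
            (buf ++ (l.drop i).take (findEnd l '\'' (i + 1) - i)) count
          have e2 := ih (findEnd l '\'' (i + 1)) (by omega)
            ([] ++ (l.drop i).take (findEnd l '\'' (i + 1) - i)) 0
          rw [e1, e2]; simp
        · rw [if_neg h2, if_neg h2]
          by_cases hc : l[i] = 's' ∧ i + 1 < l.length ∧ l.getD (i + 1) ' ' = '"' ∧
              ¬ (1 ≤ i ∧ identCont (l.getD (i - 1) ' ') = true)
          · rw [if_pos hc, if_pos hc]
            have e1 := ih (i + 1) (by omega) buf (count + 1)
            have e2 := ih (i + 1) (by omega) ([] : List Char) (0 + 1)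
            rw [e1, e2]; simp; omega
          · rw [if_neg hc, if_neg hc]
            by_cases h4 : l[i] = '"'
            · rw [if_pos h4, if_pos h4]
              have hj := le_findEnd l '"' (i + 1)
              have e1 := ih (findEnd l '"' (i + 1)) (by omega)
                (buf ++ (l.drop i).take (findEnd l '"' (i + 1) - i)) count
              have e2 := ih (findEnd l '"' (i + 1)) (by omega)
                ([] ++ (l.drop i).take (findEnd l '"' (i + 1) - i)) 0
              rw [e1, e2]; simp
            · rw [if_neg h4, if_neg h4]
              have e1 := ih (i + 1) (by omega) (buf ++ [l[i]]) count
              have e2 := ih (i + 1) (by omega) ([] ++ [l[i]]) 0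
              rw [e1, e2]; simp
    · rw [loopB.eq_def]
      conv_rhs => rw [loopB.eq_def]
      rw [dif_neg h, dif_neg h]
      simp

theorem loopB_acc (l : List Char) (i : Nat) (buf : List Char) (count : Int) :
    loopB l i buf count = (buf ++ (loopB l i [] 0).1, count + (loopB l i [] 0).2) :=
  loopB_acc_fuel l (l.length - i) i (le_refl _) buf count

-- the main invariant, by fuel on the remaining suffix
theorem main_fuel (l : List Char) : ∀ (k i : Nat), l.length - i ≤ k → GoodAt l i →
    (dropsA l i).Pairwise (· < ·) ∧
    (∀ d ∈ dropsA l i, i ≤ d ∧ d < l.length) ∧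
    (dropsA l i).reverse.foldl (fun out idx => out.take idx ++ out.drop (idx + 1)) l
      = l.take i ++ (loopB l i [] 0).1 ∧
    (loopB l i [] 0).2 = ((dropsA l i).length : Int) := by
  intro k
  induction k with
  | zero =>
    intro i hk _
    have hd : dropsA l i = [] := by unfold dropsA; rw [scanA.eq_def, dif_neg (by omega)]; rfl
    have hb : loopB l i [] 0 = ([], 0) := by rw [loopB.eq_def, dif_neg (by omega)]
    refine ⟨by simp [hd], by simp [hd], ?_, by simp [hd, hb]⟩
    rw [hd, hb]; simp [List.take_of_length_le (show l.length ≤ i by omega)]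
  | succ k ih =>
    intro i hk hg
    by_cases h : i < l.length
    · by_cases h1 : l[i] = '#'
      · -- comment: scan stops, B copies the rest verbatim
        have hd : dropsA l i = [] := by
          unfold dropsA; rw [scanA.eq_def, dif_pos h, if_pos h1]; rfl
        have hb : loopB l i [] 0 = ([] ++ l.drop i, 0) := by
          rw [loopB.eq_def, dif_pos h, if_pos h1]
        refine ⟨by simp [hd], by simp [hd], ?_, by simp [hd, hb]⟩
        rw [hd, hb]; simp
      · by_cases h2 : l[i] = '\''
        · -- char literal: both sides skip to j
          have hj1 : i + 1 ≤ findEnd l '\'' (i + 1) := le_findEnd l '\'' (i + 1)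
          have hj2 : findEnd l '\'' (i + 1) ≤ l.length := findEnd_le l '\'' (i + 1) (by omega)
          obtain ⟨p, bd, fe, ce⟩ := ih (findEnd l '\'' (i + 1)) (by omega)
            (goodAt_findEnd l '\'' (i + 1) (by omega) (by omega) (Or.inl rfl))
          have hd : dropsA l i = dropsA l (findEnd l '\'' (i + 1)) := by
            unfold dropsA; rw [scanA.eq_def, dif_pos h, if_neg h1, if_pos h2]
          have hb : loopB l i [] 0 =
              ((l.drop i).take (findEnd l '\'' (i + 1) - i)
                  ++ (loopB l (findEnd l '\'' (i + 1)) [] 0).1,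
                (loopB l (findEnd l '\'' (i + 1)) [] 0).2) := by
            rw [loopB.eq_def, dif_pos h, if_neg h1, if_pos h2, loopB_acc]; simp
          have htk : l.take (findEnd l '\'' (i + 1)) =
              l.take i ++ (l.drop i).take (findEnd l '\'' (i + 1) - i) := by
            conv_lhs => rw [show findEnd l '\'' (i + 1) = i + (findEnd l '\'' (i + 1) - i) by omega]
            exact List.take_add
          refine ⟨hd ▸ p, ?_, ?_, by rw [hd, hb]; simpa using ce⟩
          · rw [hd]; intro d hdm; have := bd d hdm; omega
          · rw [hd, hb, fe, htk, List.append_assoc]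
        · by_cases hc : l[i] = 's' ∧ i + 1 < l.length ∧ l.getD (i + 1) ' ' = '"' ∧
              ¬ (1 ≤ i ∧ identCont (l.getD (i - 1) ' ') = true)
          · -- the stripped s-prefix: A yields a drop at i, B omits the s
            obtain ⟨hcs, hlt, hqD, hnid⟩ := hc
            have hq' : l[i + 1] = '"' := by
              simpa [List.getD, List.getElem?_eq_getElem hlt] using hqD
            have hj1 : i + 2 ≤ findEnd l '"' (i + 2) := le_findEnd l '"' (i + 2)
            have hj2 : findEnd l '"' (i + 2) ≤ l.length := findEnd_le l '"' (i + 2) (by omega)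
            obtain ⟨p, bd, fe, ce⟩ := ih (findEnd l '"' (i + 2)) (by omega)
              (goodAt_findEnd l '"' (i + 2) (by omega) (by omega) (Or.inr rfl))
            have hd : dropsA l i = i :: dropsA l (findEnd l '"' (i + 2)) := by
              unfold dropsA
              rw [scanA.eq_def, dif_pos h, if_neg h1, if_neg h2, if_neg (by rw [hcs]; decide)]
              rw [scanA.eq_def, dif_pos hlt, if_neg (by rw [hq']; decide),
                if_neg (by rw [hq']; decide), if_pos hq']
              have c1 : 1 ≤ i + 1 ∧
                  (l.getD (i + 1 - 1) ' ' = 'c' ∨ l.getD (i + 1 - 1) ' ' = 's') := by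
                refine ⟨by omega, Or.inr ?_⟩
                simpa [List.getD, List.getElem?_eq_getElem h] using hcs
              have c2 : ¬ (2 ≤ i + 1 ∧ identCont (l.getD (i + 1 - 2) ' ') = true) := by
                rintro ⟨ha, hb⟩
                exact hnid ⟨by omega, by rwa [show i + 1 - 2 = i - 1 by omega] at hb⟩
              rw [if_pos c1, if_pos c2]
              simp only [List.filterMap_cons]
              have hs' : l[i]?.getD ' ' = 's' := by simp [List.getElem?_eq_getElem h, hcs]
              simp [hs', show i + 1 + 1 = i + 2 from rfl]
            have hb : loopB l i [] 0 =
                ((l.drop (i + 1)).take (findEnd l '"' (i + 2) - (i + 1))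
                    ++ (loopB l (findEnd l '"' (i + 2)) [] 0).1,
                  1 + (loopB l (findEnd l '"' (i + 2)) [] 0).2) := by
              rw [loopB.eq_def, dif_pos h, if_neg h1, if_neg h2, if_pos ⟨hcs, hlt, hqD, hnid⟩]
              rw [loopB.eq_def, dif_pos hlt, if_neg (by rw [hq']; decide),
                if_neg (by rw [hq']; decide),
                if_neg (by rintro ⟨hx, _⟩; rw [hq'] at hx; exact absurd hx (by decide)),
                if_pos hq']
              rw [loopB_acc]; simp
            have hlen : (l.take (findEnd l '"' (i + 2))).length = findEnd l '"' (i + 2) := by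
              simp [hj2]
            refine ⟨?_, ?_, ?_, ?_⟩
            · rw [hd, List.pairwise_cons]
              exact ⟨fun d hdm => by have := bd d hdm; omega, p⟩
            · rw [hd]
              intro d hdm
              rcases List.mem_cons.mp hdm with rfl | hdm'
              · exact ⟨le_refl _, h⟩
              · have := bd d hdm'; omega
            · rw [hd, hb, List.reverse_cons, List.foldl_append, fe]
              simp only [List.foldl_cons, List.foldl_nil]
              rw [List.take_append_of_le_length (by omega),
                List.drop_append_of_le_length (by omega)]
              rw [List.take_take, Nat.min_eq_left (by omega), List.drop_take]
            · rw [hd, hb]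
              simp only [List.length_cons]
              rw [ce]; push_cast; ring
          · by_cases h4 : l[i] = '"'
            · -- unprefixed (or c-prefixed) string literal: no drop, both skip to j
              have hj1 : i + 1 ≤ findEnd l '"' (i + 1) := le_findEnd l '"' (i + 1)
              have hj2 : findEnd l '"' (i + 1) ≤ l.length := findEnd_le l '"' (i + 1) (by omega)
              obtain ⟨p, bd, fe, ce⟩ := ih (findEnd l '"' (i + 1)) (by omega)
                (goodAt_findEnd l '"' (i + 1) (by omega) (by omega) (Or.inr rfl))
              have hgA := hg h h4
              have hd : dropsA l i = dropsA l (findEnd l '"' (i + 1)) := by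
                unfold dropsA
                rw [scanA.eq_def, dif_pos h, if_neg h1, if_neg h2, if_pos h4]
                simp only [List.filterMap_cons]
                by_cases c1 : 1 ≤ i ∧ (l.getD (i - 1) ' ' = 'c' ∨ l.getD (i - 1) ' ' = 's')
                · by_cases c2 : ¬ (2 ≤ i ∧ identCont (l.getD (i - 2) ' ') = true)
                  · rw [if_pos c1, if_pos c2]
                    have hne : l.getD (i - 1) ' ' ≠ 's' := by
                      intro hs; exact hgA ⟨c1.1, hs, c2⟩
                    simp [List.getD] at hne
                    simp [hne]
                  · rw [if_pos c1, if_neg c2]; simp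
                · rw [if_neg c1]; simp
              have hb : loopB l i [] 0 =
                  ((l.drop i).take (findEnd l '"' (i + 1) - i)
                      ++ (loopB l (findEnd l '"' (i + 1)) [] 0).1,
                    (loopB l (findEnd l '"' (i + 1)) [] 0).2) := by
                rw [loopB.eq_def, dif_pos h, if_neg h1, if_neg h2,
                  if_neg (by rintro ⟨hs, _⟩; rw [h4] at hs; exact absurd hs (by decide)),
                  if_pos h4, loopB_acc]
                simp
              have htk : l.take (findEnd l '"' (i + 1)) =
                  l.take i ++ (l.drop i).take (findEnd l '"' (i + 1) - i) := by
                conv_lhs => rw [show findEnd l '"' (i + 1) = i + (findEnd l '"' (i + 1) - i) by omega]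
                exact List.take_add
              refine ⟨hd ▸ p, ?_, ?_, by rw [hd, hb]; simpa using ce⟩
              · rw [hd]; intro d hdm; have := bd d hdm; omega
              · rw [hd, hb, fe, htk, List.append_assoc]
            · -- ordinary character: copied through
              have hg' : GoodAt l (i + 1) := by
                intro h' hq hs
                obtain ⟨_, hps, hnc⟩ := hs
                have hps' : l[i] = 's' := by
                  simpa [List.getD, List.getElem?_eq_getElem h] using hps
                refine hc ⟨hps', h', by simp [List.getD, List.getElem?_eq_getElem h', hq], ?_⟩
                rintro ⟨ha, hbb⟩
                exact hnc ⟨by omega, by rwa [show i + 1 - 2 = i - 1 by omega]⟩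
              obtain ⟨p, bd, fe, ce⟩ := ih (i + 1) (by omega) hg'
              have hd : dropsA l i = dropsA l (i + 1) := by
                unfold dropsA
                rw [scanA.eq_def, dif_pos h, if_neg h1, if_neg h2, if_neg h4]
              have hb : loopB l i [] 0 =
                  ([l[i]] ++ (loopB l (i + 1) [] 0).1, (loopB l (i + 1) [] 0).2) := by
                rw [loopB.eq_def, dif_pos h, if_neg h1, if_neg h2, if_neg hc, if_neg h4, loopB_acc]
                simp
              refine ⟨hd ▸ p, ?_, ?_, by rw [hd, hb]; simpa using ce⟩
              · rw [hd]; intro d hdm; have := bd d hdm; omega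
              · rw [hd, hb, fe, List.take_succ_eq_append_getElem h, List.append_assoc]
    · have hd : dropsA l i = [] := by unfold dropsA; rw [scanA.eq_def, dif_neg h]; rfl
      have hb : loopB l i [] 0 = ([], 0) := by rw [loopB.eq_def, dif_neg h]
      refine ⟨by simp [hd], by simp [hd], ?_, by simp [hd, hb]⟩
      rw [hd, hb]; simp [List.take_of_length_le (show l.length ≤ i by omega)]

theorem main_inv (l : List Char) (i : Nat) (hg : GoodAt l i) :
    (dropsA l i).Pairwise (· < ·) ∧
    (∀ d ∈ dropsA l i, i ≤ d ∧ d < l.length) ∧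
    (dropsA l i).reverse.foldl (fun out idx => out.take idx ++ out.drop (idx + 1)) l
      = l.take i ++ (loopB l i [] 0).1 ∧
    (loopB l i [] 0).2 = ((dropsA l i).length : Int) :=
  main_fuel l (l.length - i) i (le_refl _) hg

-- ===== VERDICT (by name: the statement is the Claim_ definition above) =====
theorem strip_s_prefix_from_line_spec : Claim_equal_strip_s_prefix_from_line := by
  intro line _
  unfold Spec_strip_s_prefix_from_line strip_s_prefix_from_line strip_s_prefix_from_line_alt
  have hg : GoodAt line.toList 0 := by intro h _ hs; exact absurd hs.1 (by omega)
  obtain ⟨hpw, hbd, hfold, hcnt⟩ := main_inv line.toList 0 hg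
  have hsorted : PySem.List.sorted (dropsA line.toList 0) (fun x => x) true
      = (dropsA line.toList 0).reverse := by
    refine PySem.List.sorted_rev_eq_of_perm_of_pairwise_gt _ _ _ (List.reverse_perm _) ?_
    simpa [List.pairwise_reverse] using hpw
  simp only [List.take_zero, List.nil_append] at hfold
  show (if dropsA line.toList 0 = [] then ((line, 0) : String × Int)
      else (String.ofList ((PySem.List.sorted (dropsA line.toList 0) (fun x => x) true).foldl
          (fun out idx => out.take idx ++ out.drop (idx + 1)) line.toList),
        ((dropsA line.toList 0).length : Int)))
    = (String.ofList (loopB line.toList 0 [] 0).1, (loopB line.toList 0 [] 0).2)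
  by_cases hd : dropsA line.toList 0 = []
  · rw [if_pos hd]
    have h1 : (loopB line.toList 0 [] 0).1 = line.toList := by rw [← hfold, hd]; rfl
    have h2 : (loopB line.toList 0 [] 0).2 = 0 := by rw [hcnt, hd]; rfl
    rw [h1, h2]; simp
  · rw [if_neg hd, hsorted, hfold, hcnt]
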